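-- pv_equiv track=rewrite | github.com/michaelayoade/dotmac_erp | scripts/seed_e2e_data.py | _unique_code
-- ===== SOURCE A (Python) =====
-- from typing import Iterable
--
-- def _unique_code(existing: Iterable[str], base: str) -> str:
--     if base not in existing:
--         return base
--     index = 2
--     while True:
--         candidate = f"{base}-{index}"
--         if candidate not in existing:
--             return candidate
--         index += 1
-- ===== SOURCE B (Python) =====
-- def _unique_code(existing, base):
--     # Mex via sort-then-scan: one pass parses the integer suffixes of entries
--     # of the exact form f"{base}-{N}" (canonical decimals only), then a single
--     # scan of the sorted suffixes finds the first free index -- no per-candidate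
--     # membership probing of `existing`.
--     prefix = base + "-"
--     has_base = False
--     nums = []
--     for s in existing:
--         if s == base:
--             has_base = True
--         elif s.startswith(prefix):
--             t = s[len(prefix):]
--             if t and all("0" <= ch <= "9" for ch in t) and (t == "0" or t[0] != "0"):
--                 n = 0
--                 for ch in t:
--                     n = 10 * n + (ord(ch) - 48)
--                 nums.append(n)
--     if not has_base:
--         return base
--     free = 2
--     for v in sorted(nums):
--         if v == free:
--             free += 1
--         elif v > free:
--             break
--     return prefix + str(free)
-- ===== Notes on version B (the rewrite author's own statement) =====
-- stated objective: alternative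
-- what changed: A probes existing with one membership scan per candidate base-2, base-3, ...; B never probes candidates: one pass parses the canonical integer suffixes N of entries equal to base-N (and flags bare base), sorts the parsed suffixes, and a single scan of the sorted list yields the first gap (mex) at or above 2.
import Mathlib
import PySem

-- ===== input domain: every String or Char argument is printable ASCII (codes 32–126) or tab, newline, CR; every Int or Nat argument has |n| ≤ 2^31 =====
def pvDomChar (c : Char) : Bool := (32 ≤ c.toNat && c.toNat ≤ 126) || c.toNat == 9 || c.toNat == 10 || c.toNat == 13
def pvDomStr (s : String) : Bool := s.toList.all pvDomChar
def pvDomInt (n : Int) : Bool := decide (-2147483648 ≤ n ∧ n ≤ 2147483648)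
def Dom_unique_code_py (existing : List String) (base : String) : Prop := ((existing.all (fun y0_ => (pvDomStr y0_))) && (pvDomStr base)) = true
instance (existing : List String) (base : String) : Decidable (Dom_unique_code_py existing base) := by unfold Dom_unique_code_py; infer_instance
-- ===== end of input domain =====

-- B replaces A's unbounded probe loop (one membership scan of `existing` per candidate) by a
-- parse-sort-scan mex computation: one pass parses the canonical integer suffixes, the sorted
-- suffix list is scanned once for the first gap (alternative decomposition).

-- ===== PORT A =====
-- A's `while True` loop; the fuel argument only makes it total in Lean: the
-- first absent candidate is always reached before `existing.length + 1` steps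
-- (existing.length + 1 distinct candidates cannot all lie in `existing`), so
-- the fuel-0 branch mirrors nothing Python reaches.
def uniqueLoopA (existing : List String) (base : String) : Nat → Int → String
  | 0, index => base ++ "-" ++ PySem.Int.toStr index
  | fuel+1, index =>
      let candidate := base ++ "-" ++ PySem.Int.toStr index
      if candidate ∈ existing then uniqueLoopA existing base fuel (index + 1) else candidate

def unique_code_py (existing : List String) (base : String) : String :=
  if base ∈ existing then uniqueLoopA existing base (existing.length + 1) 2 else base

-- ===== PORT B =====
-- Source B's canonical-decimal test `t and all('0' <= ch <= '9' for ch in t) and (t == "0" or t[0] != "0")`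
def canonTail (t : List Char) : Bool :=
  match t with
  | [] => false
  | c :: _ => (t.all (fun ch => decide ('0' ≤ ch) && decide (ch ≤ '9'))) &&
              (t == ['0'] || !(c == '0'))

-- Source B's inner parse loop `n = 0; for ch in t: n = 10 * n + (ord(ch) - 48)`
def parseDigits (t : List Char) : Int :=
  t.foldl (fun n ch => 10 * n + ((ch.toNat : Int) - 48)) 0

-- one step of Source B's indexing loop body
def stepB (base pre : String) (acc : Bool × List Int) (s : String) : Bool × List Int :=
  if s == base then (true, acc.2)
  else if PySem.Str.startswith s pre then
    (if canonTail (PySem.Str.slice s (some (PySem.Str.len pre)) none).toList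
     then (acc.1, acc.2 ++ [parseDigits (PySem.Str.slice s (some (PySem.Str.len pre)) none).toList])
     else acc)
  else acc

-- Source B's single indexing pass over `existing` (flag for `base`; parsed canonical suffixes)
def indexPassB (existing : List String) (base : String) (pre : String) : Bool × List Int :=
  existing.foldl (stepB base pre) (false, [])

-- Source B's single scan of the sorted suffixes: `if v == free: free += 1; elif v > free: break`
def scanGap : List Int → Int → Int
  | [], free => free
  | v :: rest, free =>
      if v = free then scanGap rest (free + 1)
      else if free < v then free
      else scanGap rest free

def unique_code_py_alt (existing : List String) (base : String) : String :=
  let pre := base ++ "-"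
  let st := indexPassB existing base pre
  if st.1 then pre ++ PySem.Int.toStr (scanGap (PySem.List.sorted st.2 (fun x => x) false) 2)
  else base

-- ===== PRECONDITION & SPEC =====
def Spec_unique_code_py (existing : List String) (base : String) (out : String) : Prop := out = unique_code_py_alt existing base
instance (existing : List String) (base : String) (out : String) : Decidable (Spec_unique_code_py existing base out) := by unfold Spec_unique_code_py; infer_instance

-- ===== CLAIM (what is proved, stated in full; the proofs are below) =====
def Claim_equal_unique_code_py : Prop := ∀ (existing : List String) (base : String), Dom_unique_code_py existing base → Spec_unique_code_py existing base (unique_code_py existing base)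

-- ===== LEMMAS AND PROOFS =====

-- str(n) for a Nat, as its own structural recursion (digs n = decimal digits of n)
def digs (n : Nat) : List Char :=
  if n < 10 then [Nat.digitChar n]
  else digs (n / 10) ++ [Nat.digitChar (n % 10)]
  decreasing_by exact Nat.div_lt_self (by omega) (by omega)

theorem digitChar_toNat (k : Nat) (h : k < 10) : (Nat.digitChar k).toNat = k + 48 := by
  interval_cases k <;> rfl

theorem digitChar_isDigit (k : Nat) (h : k < 10) :
    (decide ('0' ≤ Nat.digitChar k) && decide (Nat.digitChar k ≤ '9')) = true := by
  interval_cases k <;> decide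

theorem char_eq_of_toNat {a b : Char} (h : a.toNat = b.toNat) : a = b := by
  apply Char.ext
  exact UInt32.toNat_inj.mp h

theorem digit_bounds (c : Char) (h0 : '0' ≤ c) (h9 : c ≤ '9') :
    48 ≤ c.toNat ∧ c.toNat ≤ 57 :=
  ⟨Nat.succ_le_of_lt h0, Fin.mk_le_mk.mp h9⟩

theorem digitChar_of_digit (c : Char) (h0 : '0' ≤ c) (h9 : c ≤ '9') :
    Nat.digitChar (c.toNat - 48) = c := by
  obtain ⟨hl, hu⟩ := digit_bounds c h0 h9
  apply char_eq_of_toNat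
  rw [digitChar_toNat (c.toNat - 48) (by omega)]
  omega

theorem toDigitsCore_eq_digs : ∀ (f n : Nat) (ds : List Char), n < f →
    Nat.toDigitsCore 10 f n ds = digs n ++ ds := by
  intro f
  induction f with
  | zero => intro n ds h; omega
  | succ f ih =>
      intro n ds h
      rw [Nat.toDigitsCore]
      by_cases h10 : n < 10
      · have hz : n / 10 = 0 := Nat.div_eq_of_lt h10
        have hm : n % 10 = n := Nat.mod_eq_of_lt h10
        rw [digs]
        simp [hz, hm, h10]
      · have hne : ¬ n / 10 = 0 := by omega
        have hlt : n / 10 < f := by omega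
        have hstep : digs n = digs (n / 10) ++ [Nat.digitChar (n % 10)] := by
          conv_lhs => rw [digs]
          rw [if_neg h10]
        rw [if_neg hne, ih (n / 10) _ hlt, hstep, List.append_assoc]
        rfl

theorem toChars_eq_digs (n : Int) (h : 0 ≤ n) : PySem.Int.toChars n = digs n.toNat := by
  rw [PySem.Int.toChars, if_neg (by omega), Nat.toDigits,
    toDigitsCore_eq_digs (n.toNat + 1) n.toNat [] (by omega), List.append_nil]

theorem digs_all_digits (n : Nat) :
    (digs n).all (fun ch => decide ('0' ≤ ch) && decide (ch ≤ '9')) = true := by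
  induction n using digs.induct with
  | case1 n h =>
      rw [digs, if_pos h]
      simp [digitChar_isDigit n h]
  | case2 n h ih =>
      rw [digs, if_neg h, List.all_append, ih]
      simp [digitChar_isDigit (n % 10) (by omega)]

theorem digs_ne_nil (n : Nat) : digs n ≠ [] := by
  rw [digs]
  split <;> simp

theorem digs_head_ne_zero (n : Nat) (h : n ≠ 0) : ∀ (c : Char) (rest : List Char),
    digs n = c :: rest → c ≠ '0' := by
  induction n using digs.induct with
  | case1 n h10 =>
      intro c rest he
      rw [digs, if_pos h10] at he
      simp only [List.cons.injEq] at he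
      obtain ⟨hc, -⟩ := he
      subst hc
      interval_cases n
      · exact absurd rfl h
      all_goals decide
  | case2 n h10 ih =>
      intro c rest he
      rw [digs, if_neg h10] at he
      obtain ⟨c', rest', hd⟩ : ∃ c' rest', digs (n / 10) = c' :: rest' := by
        cases hdd : digs (n / 10) with
        | nil => exact absurd hdd (digs_ne_nil _)
        | cons a b => exact ⟨a, b, rfl⟩
      rw [hd] at he
      simp only [List.cons_append, List.cons.injEq] at he
      obtain ⟨hcc, -⟩ := he
      subst hcc
      exact ih (by omega) c' rest' hd

theorem digs_zero : digs 0 = ['0'] := by rw [digs]; rfl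

theorem canonTail_digs (n : Nat) : canonTail (digs n) = true := by
  obtain ⟨c, rest, hd⟩ : ∃ c rest, digs n = c :: rest := by
    cases hdd : digs n with
    | nil => exact absurd hdd (digs_ne_nil _)
    | cons a b => exact ⟨a, b, rfl⟩
  have hmatch : canonTail (c :: rest) =
      (((c :: rest).all fun ch => decide ('0' ≤ ch) && decide (ch ≤ '9')) &&
        ((c :: rest) == ['0'] || !(c == '0'))) := rfl
  have hall := digs_all_digits n
  rw [hd] at hall
  rw [hd, hmatch, hall, Bool.true_and]
  by_cases hn : n = 0
  · subst hn
    rw [digs_zero] at hd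
    simp only [List.cons.injEq] at hd
    simp [hd.2]
  · have := digs_head_ne_zero n hn c rest hd
    simp [this]

theorem parse_digs (n : Nat) : ∀ (a : Int),
    (digs n).foldl (fun m ch => 10 * m + ((ch.toNat : Int) - 48)) a
      = a * 10 ^ (digs n).length + n := by
  induction n using digs.induct with
  | case1 n h =>
      intro a
      rw [digs, if_pos h]
      have := digitChar_toNat n h
      simp [this]
      ring
  | case2 n h ih =>
      intro a
      rw [digs, if_neg h, List.foldl_append, List.length_append, ih a]
      have hd := digitChar_toNat (n % 10) (by omega)
      simp only [List.foldl_cons, List.foldl_nil, List.length_cons, List.length_nil, hd]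
      have hsplit : (n : Int) = 10 * ((n / 10 : Nat) : Int) + ((n % 10 : Nat) : Int) := by
        push_cast
        omega
      push_cast
      ring_nf
      push_cast at hsplit ⊢
      nlinarith [hsplit]

theorem parseDigits_digs (n : Nat) : parseDigits (digs n) = (n : Int) := by
  rw [parseDigits, parse_digs n 0]
  simp

theorem parse_lower_bound (t : List Char) : ∀ (a : Int), 0 ≤ a →
    t.all (fun ch => decide ('0' ≤ ch) && decide (ch ≤ '9')) = true →
    a ≤ t.foldl (fun m ch => 10 * m + ((ch.toNat : Int) - 48)) a := by
  induction t with
  | nil => intro a _ _; simp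
  | cons c rest ih =>
      intro a ha hall
      rw [List.all_cons, Bool.and_eq_true] at hall
      have hx : ('0' ≤ c) ∧ (c ≤ '9') := by simpa using hall.1
      obtain ⟨hb, -⟩ := digit_bounds c hx.1 hx.2
      have hstep : a ≤ 10 * a + ((c.toNat : Int) - 48) := by omega
      calc a ≤ 10 * a + ((c.toNat : Int) - 48) := hstep
        _ ≤ _ := by
            rw [List.foldl_cons]
            exact ih _ (by omega) hall.2

theorem digs_inj {a b : Nat} (h : digs a = digs b) : a = b := by
  have := parseDigits_digs a
  rw [h, parseDigits_digs b] at this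
  exact_mod_cast this.symm

-- round trip: every canonical digit string is digs of its value
theorem canon_roundtrip (t : List Char) (hc : canonTail t = true) :
    0 ≤ parseDigits t ∧ digs (parseDigits t).toNat = t := by
  induction t using List.reverseRecOn with
  | nil => simp [canonTail] at hc
  | append_singleton l c ih =>
      cases hl : l with
      | nil =>
          subst hl
          simp only [List.nil_append] at hc ⊢
          rw [canonTail.eq_def] at hc
          simp only [List.all_cons, List.all_nil, Bool.and_true, Bool.and_eq_true] at hc
          obtain ⟨hb48, hb57⟩ := digit_bounds c (by simpa using hc.1.1) (by simpa using hc.1.2)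
          have hv : parseDigits [c] = (c.toNat : Int) - 48 := by
            simp [parseDigits]
          constructor
          · omega
          · rw [hv]
            have htn : ((c.toNat : Int) - 48).toNat = c.toNat - 48 := by omega
            rw [htn, digs, if_pos (by omega),
              digitChar_of_digit c (by simpa using hc.1.1) (by simpa using hc.1.2)]
      | cons c0 l' =>
          subst hl
          -- decompose the canonicity of (c0 :: l') ++ [c]
          rw [canonTail.eq_def] at hc
          simp only [List.cons_append] at hc
          rw [Bool.and_eq_true, Bool.or_eq_true] at hc
          obtain ⟨hall, hz⟩ := hc
          rw [List.all_cons, List.all_append, List.all_cons, List.all_nil] at hall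
          simp only [Bool.and_true, Bool.and_eq_true] at hall
          obtain ⟨hd0, hdl', hdc⟩ := hall
          have hc0 : c0 ≠ '0' := by
            rcases hz with hz | hz
            · exfalso
              rw [beq_iff_eq] at hz
              simp only [List.cons.injEq] at hz
              exact absurd hz.2 (by simp)
            · simpa using hz
          -- canonicity of the prefix c0 :: l'
          have hcl : canonTail (c0 :: l') = true := by
            rw [canonTail.eq_def]
            simp only [List.all_cons, Bool.and_eq_true]
            refine ⟨⟨hd0, ?_⟩, ?_⟩
            · simpa using hdl'
            · simp [hc0]
          obtain ⟨hvl0, hvl⟩ := ih hcl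
          set vl := parseDigits (c0 :: l') with hvldef
          -- vl ≥ 1 because the leading digit is nonzero
          have hb0 := digit_bounds c0 (by simpa using hd0.1) (by simpa using hd0.2)
          have hne0 : c0.toNat ≠ 48 := by
            intro hh
            exact hc0 (char_eq_of_toNat (by rw [hh]; rfl))
          have hvl1 : 1 ≤ vl := by
            have : parseDigits (c0 :: l') =
                l'.foldl (fun m ch => 10 * m + ((ch.toNat : Int) - 48)) ((c0.toNat : Int) - 48) := by
              simp [parseDigits]
            rw [hvldef, this]
            calc (1 : Int) ≤ (c0.toNat : Int) - 48 := by omega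
              _ ≤ _ := parse_lower_bound l' _ (by omega) (by simpa using hdl')
          -- the value of the whole string
          obtain ⟨hb48, hb57⟩ := digit_bounds c (by simpa using hdc.1) (by simpa using hdc.2)
          have hv : parseDigits ((c0 :: l') ++ [c]) = 10 * vl + ((c.toNat : Int) - 48) := by
            rw [parseDigits, List.foldl_append]
            rfl
          refine ⟨by omega, ?_⟩
          rw [hv]
          have hq : (10 * vl + ((c.toNat : Int) - 48)).toNat = 10 * vl.toNat + (c.toNat - 48) := by
            omega
          rw [hq, digs, if_neg (by omega)]
          have hdiv : (10 * vl.toNat + (c.toNat - 48)) / 10 = vl.toNat := by omega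
          have hmod : (10 * vl.toNat + (c.toNat - 48)) % 10 = c.toNat - 48 := by omega
          rw [hdiv, hmod, hvl,
            digitChar_of_digit c (by simpa using hdc.1) (by simpa using hdc.2)]

-- the candidate string builder and its list form
def candA (base : String) (m : Int) : String := base ++ "-" ++ PySem.Int.toStr m

theorem toList_candA (base : String) (m : Int) :
    (candA base m).toList = (base ++ "-").toList ++ PySem.Int.toChars m := by
  simp [candA, String.toList_append, PySem.Int.toList_toStr, List.append_assoc]

theorem candA_inj (base : String) {a b : Int} (ha : 0 ≤ a) (hb : 0 ≤ b)
    (h : candA base a = candA base b) : a = b := by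
  have hl : (candA base a).toList = (candA base b).toList := by rw [h]
  rw [toList_candA, toList_candA] at hl
  have := List.append_cancel_left hl
  rw [toChars_eq_digs a ha, toChars_eq_digs b hb] at this
  have := digs_inj this
  omega

-- s.startswith(pre) with tail t says exactly s = pre + t  (list form)
theorem slice_drop (pre s : String) :
    (PySem.Str.slice s (some (PySem.Str.len pre)) none).toList
      = s.toList.drop pre.toList.length := by
  simp [PySem.Str.toList_slice, PySem.Chars.slice_eq_listSlice, PySem.Str.len_eq,
    PySem.List.slice_from_natCast]

theorem startswith_slice_iff_list (pre s : String) (t : List Char) :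
    (PySem.Str.startswith s pre = true ∧ (PySem.Str.slice s (some (PySem.Str.len pre)) none).toList = t) ↔
      s.toList = pre.toList ++ t := by
  constructor
  · rintro ⟨h1, h2⟩
    rw [PySem.Str.startswith_eq, PySem.Chars.startswith_iff] at h1
    obtain ⟨u, hu⟩ := h1
    rw [slice_drop] at h2
    rw [← hu] at h2 ⊢
    rw [List.drop_left] at h2
    rw [h2]
  · intro h
    constructor
    · rw [PySem.Str.startswith_eq, PySem.Chars.startswith_iff]
      exact ⟨t, h.symm⟩
    · rw [slice_drop, h, List.drop_left]

theorem base_not_startswith (base : String) :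
    PySem.Str.startswith base (base ++ "-") = false := by
  rw [PySem.Str.startswith_eq]
  apply Bool.eq_false_iff.mpr
  intro hc
  rw [PySem.Chars.startswith_iff] at hc
  obtain ⟨u, hu⟩ := hc
  have := congrArg List.length hu
  rw [String.toList_append, List.length_append, List.length_append] at this
  have : ("-" : String).toList.length = 1 := by decide
  omega

-- flag component of one step / of the indexing pass
theorem stepB_fst (base pre : String) (acc : Bool × List Int) (s : String) :
    (stepB base pre acc s).1 = (acc.1 || (s == base)) := by
  rw [stepB]
  by_cases h1 : (s == base) = true
  · rw [if_pos h1, h1, Bool.or_true]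
  · have h1' : (s == base) = false := by simpa using h1
    rw [if_neg h1, h1', Bool.or_false]
    by_cases h2 : PySem.Str.startswith s pre = true
    · rw [if_pos h2]
      by_cases h3 : canonTail (PySem.Str.slice s (some (PySem.Str.len pre)) none).toList = true
      · rw [if_pos h3]
      · rw [if_neg h3]
    · rw [if_neg h2]

theorem indexPassB_fst_fold (existing : List String) (base pre : String) :
    ∀ (acc : Bool × List Int),
      (existing.foldl (stepB base pre) acc).1 = (acc.1 || existing.any (· == base)) := by
  induction existing with
  | nil => intro acc; simp
  | cons x xs ih =>
      intro acc
      rw [List.foldl_cons, List.any_cons, ih, stepB_fst, Bool.or_assoc]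

theorem indexPassB_fst (existing : List String) (base pre : String) :
    (indexPassB existing base pre).1 = decide (base ∈ existing) := by
  rw [indexPassB, indexPassB_fst_fold existing base pre (false, [])]
  by_cases hb : base ∈ existing
  · simp only [hb, decide_true, Bool.false_or, List.any_eq_true]
    exact ⟨base, hb, by simp⟩
  · simp only [hb, decide_false, Bool.false_or, List.any_eq_false]
    intro s hs
    simp only [beq_iff_eq]
    rintro rfl
    exact hb hs

-- suffix component of one step (for the actual prefix base + "-")
theorem stepB_snd_mem (base : String) (acc : Bool × List Int) (s : String) (m : Int) :
    m ∈ (stepB base (base ++ "-") acc s).2 ↔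
      m ∈ acc.2 ∨ (PySem.Str.startswith s (base ++ "-") = true ∧
        canonTail (PySem.Str.slice s (some (PySem.Str.len (base ++ "-"))) none).toList = true ∧
        parseDigits (PySem.Str.slice s (some (PySem.Str.len (base ++ "-"))) none).toList = m) := by
  rw [stepB]
  by_cases h1 : (s == base) = true
  · rw [if_pos h1]
    have hsb : s = base := by simpa using h1
    subst hsb
    constructor
    · exact Or.inl
    · rintro (h | ⟨hsw, -, -⟩)
      · exact h
      · rw [base_not_startswith s] at hsw
        exact absurd hsw (by simp)
  · rw [if_neg h1]
    by_cases h2 : PySem.Str.startswith s (base ++ "-") = true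
    · rw [if_pos h2]
      by_cases h3 : canonTail (PySem.Str.slice s (some (PySem.Str.len (base ++ "-"))) none).toList = true
      · rw [if_pos h3]
        simp only [List.mem_append, List.mem_singleton]
        constructor
        · rintro (h | h)
          · exact Or.inl h
          · exact Or.inr ⟨h2, h3, h.symm⟩
        · rintro (h | ⟨-, -, h⟩)
          · exact Or.inl h
          · exact Or.inr h.symm
      · rw [if_neg h3]
        constructor
        · exact Or.inl
        · rintro (h | ⟨-, hc, -⟩)
          · exact h
          · exact absurd hc h3
    · rw [if_neg h2]
      constructor
      · exact Or.inl
      · rintro (h | ⟨hc, -, -⟩)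
        · exact h
        · exact absurd hc h2

theorem indexPassB_snd_fold (existing : List String) (base : String) (m : Int) :
    ∀ (acc : Bool × List Int),
      (m ∈ (existing.foldl (stepB base (base ++ "-")) acc).2) ↔
      m ∈ acc.2 ∨ ∃ s ∈ existing, PySem.Str.startswith s (base ++ "-") = true ∧
        canonTail (PySem.Str.slice s (some (PySem.Str.len (base ++ "-"))) none).toList = true ∧
        parseDigits (PySem.Str.slice s (some (PySem.Str.len (base ++ "-"))) none).toList = m := by
  induction existing with
  | nil => intro acc; simp
  | cons x xs ih =>
      intro acc
      rw [List.foldl_cons, ih, stepB_snd_mem]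
      simp only [List.mem_cons]
      constructor
      · rintro ((h | h) | ⟨s, hs, hc⟩)
        · exact Or.inl h
        · exact Or.inr ⟨x, Or.inl rfl, h⟩
        · exact Or.inr ⟨s, Or.inr hs, hc⟩
      · rintro (h | ⟨s, (rfl | hs), hc⟩)
        · exact Or.inl (Or.inl h)
        · exact Or.inl (Or.inr hc)
        · exact Or.inr ⟨s, hs, hc⟩

-- the bridge: for m ≥ 0, candidate membership in `existing` is membership in the parsed suffixes
theorem cand_mem_iff (existing : List String) (base : String) (m : Int) (hm : 0 ≤ m) :
    candA base m ∈ existing ↔ m ∈ (indexPassB existing base (base ++ "-")).2 := by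
  rw [indexPassB, indexPassB_snd_fold existing base m (false, [])]
  simp only [List.not_mem_nil, false_or]
  constructor
  · intro hmem
    refine ⟨candA base m, hmem, ?_⟩
    have hlist : (candA base m).toList = (base ++ "-").toList ++ digs m.toNat := by
      rw [toList_candA, toChars_eq_digs m hm]
    obtain ⟨h1, h2⟩ := (startswith_slice_iff_list (base ++ "-") (candA base m) (digs m.toNat)).mpr hlist
    refine ⟨h1, ?_, ?_⟩
    · rw [h2]; exact canonTail_digs m.toNat
    · rw [h2, parseDigits_digs]; omega
  · rintro ⟨s, hs, h1, h2, h3⟩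
    set t := (PySem.Str.slice s (some (PySem.Str.len (base ++ "-"))) none).toList with ht
    obtain ⟨hge, hrt⟩ := canon_roundtrip t h2
    have hslist : s.toList = (base ++ "-").toList ++ t :=
      (startswith_slice_iff_list (base ++ "-") s t).mp ⟨h1, rfl⟩
    have : s = candA base m := by
      apply String.toList_inj.mp
      rw [hslist, toList_candA, toChars_eq_digs m hm, ← h3, hrt]
    rw [← this]
    exact hs

-- the scan of a sorted list returns the least free value ≥ the start
theorem scanGap_spec (l : List Int) (hl : l.Pairwise (· ≤ ·)) : ∀ (c : Int),
    c ≤ scanGap l c ∧ scanGap l c ∉ l ∧ ∀ m, c ≤ m → m < scanGap l c → m ∈ l := by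
  induction l with
  | nil => intro c; simp [scanGap]
  | cons v rest ih =>
      intro c
      rw [List.pairwise_cons] at hl
      obtain ⟨hv, hrest⟩ := hl
      by_cases hvc : v = c
      · subst hvc
        rw [scanGap, if_pos rfl]
        obtain ⟨h1, h2, h3⟩ := ih hrest (v + 1)
        refine ⟨by omega, ?_, ?_⟩
        · intro hmem
          rcases List.mem_cons.mp hmem with he | he
          · omega
          · exact h2 he
        · intro m hm hlt
          by_cases hmv : m = v
          · exact hmv ▸ List.mem_cons_self
          · exact List.mem_cons_of_mem v (h3 m (by omega) hlt)
      · rw [scanGap, if_neg hvc]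
        by_cases hcv : c < v
        · rw [if_pos hcv]
          refine ⟨le_refl c, ?_, by omega⟩
          intro hmem
          rcases List.mem_cons.mp hmem with he | he
          · omega
          · have := hv c he
            omega
        · rw [if_neg hcv]
          obtain ⟨h1, h2, h3⟩ := ih hrest c
          refine ⟨h1, ?_, ?_⟩
          · intro hmem
            rcases List.mem_cons.mp hmem with he | he
            · omega
            · exact h2 he
          · intro m hm hlt
            exact List.mem_cons_of_mem v (h3 m hm hlt)

-- A's fueled loop reaches the first free candidate when the fuel covers the gap
theorem loopA_reach (existing : List String) (base : String) (R : Int)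
    (hout : candA base R ∉ existing) :
    ∀ (fuel : Nat) (c : Int), c ≤ R → R - c < fuel →
      (∀ m, c ≤ m → m < R → candA base m ∈ existing) →
      uniqueLoopA existing base fuel c = candA base R := by
  intro fuel
  induction fuel with
  | zero => intro c h1 h2 _; exfalso; omega
  | succ f ih =>
      intro c h1 h2 hall
      rw [uniqueLoopA]
      have hcand : (base ++ "-" ++ PySem.Int.toStr c) = candA base c := rfl
      by_cases hc : c = R
      · subst hc
        rw [if_neg (show ¬ (base ++ "-" ++ PySem.Int.toStr c ∈ existing) from hcand ▸ hout)]
        exact hcand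
      · have hcR : c < R := by omega
        rw [if_pos (show base ++ "-" ++ PySem.Int.toStr c ∈ existing from
          hcand ▸ hall c (le_refl c) hcR)]
        exact ih (c + 1) (by omega) (by omega) (fun m hm hlt => hall m (by omega) hlt)

-- pigeonhole: the first gap at or above 2 lies within existing.length + 2
theorem gap_bound (existing : List String) (base : String) (R : Int) (h2 : 2 ≤ R)
    (hall : ∀ m, 2 ≤ m → m < R → candA base m ∈ existing) :
    R - 2 ≤ (existing.length : Int) := by
  set k := (R - 2).toNat with hk
  have hkR : (k : Int) = R - 2 := by omega
  set L := (List.range k).map (fun j : Nat => candA base (2 + (j : Int))) with hL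
  have hnodup : L.Nodup := by
    rw [hL]
    apply List.Nodup.map_on
    · intro a _ b _ hab
      have := candA_inj base (a := 2 + (a : Int)) (b := 2 + (b : Int)) (by omega) (by omega) hab
      omega
    · exact List.nodup_range
  have hsub : L ⊆ existing := by
    intro x hx
    rw [hL, List.mem_map] at hx
    obtain ⟨j, hj, rfl⟩ := hx
    rw [List.mem_range] at hj
    apply hall
    · omega
    · have : (j : Int) < (k : Int) := by exact_mod_cast hj
      omega
  have hlen : L.length ≤ existing.length := (List.subperm_of_subset hnodup hsub).length_le
  rw [hL, List.length_map, List.length_range] at hlen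
  omega

-- ===== VERDICT (by name: the statement is the Claim_ definition above) =====
theorem unique_code_py_spec : Claim_equal_unique_code_py := by
  intro existing base _
  show unique_code_py existing base = unique_code_py_alt existing base
  rw [unique_code_py, unique_code_py_alt]
  show _ = if (indexPassB existing base (base ++ "-")).1 then
      (base ++ "-") ++ PySem.Int.toStr (scanGap (PySem.List.sorted (indexPassB existing base (base ++ "-")).2 (fun x => x) false) 2)
    else base
  rw [indexPassB_fst existing base (base ++ "-")]
  by_cases hb : base ∈ existing
  · rw [if_pos hb, if_pos (by simp [hb])]
    set nums := (indexPassB existing base (base ++ "-")).2 with hnums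
    set sl := PySem.List.sorted nums (fun x => x) false with hsl
    have hpw : sl.Pairwise (· ≤ ·) := PySem.List.sorted_pairwise nums (fun x => x)
    obtain ⟨hge, hnotin, hall⟩ := scanGap_spec sl hpw 2
    set R := scanGap sl 2 with hR
    have hmem : ∀ m : Int, 0 ≤ m → (m ∈ sl ↔ candA base m ∈ existing) := by
      intro m hm
      rw [hsl, PySem.List.mem_sorted]
      exact (cand_mem_iff existing base m hm).symm
    have hout : candA base R ∉ existing := by
      intro hc
      exact hnotin ((hmem R (by omega)).mpr hc)
    have hallm : ∀ m, 2 ≤ m → m < R → candA base m ∈ existing := by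
      intro m hm hlt
      exact (hmem m (by omega)).mp (hall m hm hlt)
    have hbound := gap_bound existing base R hge hallm
    have := loopA_reach existing base R hout (existing.length + 1) 2 hge (by push_cast; omega) hallm
    rw [this, candA, String.append_assoc]
  · rw [if_neg hb, if_neg (by simp [hb])]
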